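-- pv_equiv track=rewrite | github.com/Satwik95/Coding-101 | SPOJ/BaisedSPOJ.py | calc_badness
-- ===== SOURCE A (Python) =====
-- def calc_badness(N,h):
--     freq = [0]*(N+1)
--     for x in h:
--         freq[h[x]]+=1
--     badness = pos = 0
--     for i in range(1,N+1):
--         while freq[i]:
--             pos+=1
--             badness += abs(i-pos)
--             freq[i]-=1
--     return badness
-- ===== SOURCE B (Python) =====
-- def calc_badness(N, h):
--     freq = [0] * (N + 1)
--     for v in h.values():
--         freq[v] += 1
--     badness = 0
--     pos = 0
--     for i in range(1, N + 1):
--         cnt = freq[i]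
--         # the cnt items of slot i occupy consecutive positions lo..hi;
--         # add sum of |i - p| over that range in closed form
--         lo, hi = pos + 1, pos + cnt
--         if hi <= i:
--             badness += (i - lo + (i - hi)) * cnt // 2
--         elif lo >= i:
--             badness += (lo - i + (hi - i)) * cnt // 2
--         else:
--             a, b = i - lo, hi - i
--             badness += a * (a + 1) // 2 + b * (b + 1) // 2
--         pos += cnt
--     return badness
-- ===== Notes on version B (the rewrite author's own statement) =====
-- stated objective: alternative
-- what changed: A places the counted items one by one with a nested while loop, accumulating |i - pos| per item; B replaces that inner loop with a closed-form arithmetic-series computation of each slot's whole contribution (positions pos+1..pos+cnt split around i), one O(1) block per slot; Pre_ excludes only the inputs on which A's freq[...] indexing raises IndexError (a value above N or below -(N+1)) plus duplicate keys a Python dict cannot carry.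
import Mathlib
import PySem

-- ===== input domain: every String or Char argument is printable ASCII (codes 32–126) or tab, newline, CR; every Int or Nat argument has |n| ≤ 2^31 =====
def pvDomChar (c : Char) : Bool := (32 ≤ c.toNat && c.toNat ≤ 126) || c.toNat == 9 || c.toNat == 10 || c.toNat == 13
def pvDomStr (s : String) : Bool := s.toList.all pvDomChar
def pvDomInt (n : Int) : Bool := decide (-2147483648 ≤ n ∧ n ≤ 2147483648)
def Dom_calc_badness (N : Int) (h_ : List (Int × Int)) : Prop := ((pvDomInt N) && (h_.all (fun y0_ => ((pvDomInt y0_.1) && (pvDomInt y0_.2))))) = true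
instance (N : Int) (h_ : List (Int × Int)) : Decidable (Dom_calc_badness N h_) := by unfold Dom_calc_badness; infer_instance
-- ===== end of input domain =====

-- B keeps the bucket-count loop but replaces A's item-by-item inner while loop with a
-- closed-form arithmetic-series block per slot (alternative decomposition; equal on Pre_).

-- ===== PORT A =====
-- 'freq[v] += 1' with Python's list-index semantics: a negative index counts from the
-- end; an out-of-range index is an IndexError in Python (excluded by Pre_; the port
-- then leaves the list unchanged). freq is an internal Python list, backed by an Array.
def pvWrapInc (xs : Array Int) (v : Int) : Array Int :=
  let n : Int := xs.size
  let j : Int := if v < 0 then v + n else v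
  if h : 0 ≤ j ∧ j < n then xs.set j.toNat (xs.getD j.toNat 0 + 1) (by omega) else xs

-- 'freq[i]' read (0 ≤ i < size in both ports' loops under Pre_)
def pvAGet (xs : Array Int) (i : Int) : Int :=
  let j : Int := if i < 0 then i + xs.size else i
  xs.getD j.toNat 0

-- 'while freq[i]: pos += 1; badness += abs(i - pos); freq[i] -= 1', run to exhaustion
def pvWhileA (i : Int) (cnt : Nat) (pos badness : Int) : Int × Int :=
  match cnt with
  | 0 => (pos, badness)
  | Nat.succ c => pvWhileA i c (pos + 1) (badness + |i - (pos + 1)|)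

def calc_badness (N : Int) (h_ : List (Int × Int)) : Int :=
  let d := PySem.Dict.mk h_
  let freq := (PySem.Dict.keys d).foldl
      (fun f x => pvWrapInc f (PySem.Dict.getD d x 0)) (Array.replicate (N + 1).toNat 0)
  let st := (PySem.List.pyRange 1 (N + 1) 1).foldl
      (fun (st : Int × Int) i =>
        pvWhileA i (pvAGet freq i).toNat st.1 st.2) (0, 0)
  st.2

-- ===== PORT B =====
-- the loop-body block of Source B: contribution of the cnt items of slot i sitting at
-- consecutive positions pos+1 .. pos+cnt, as the closed-form arithmetic series
def pvSlotAdd (i pos cnt : Int) : Int :=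
  let lo := pos + 1
  let hi := pos + cnt
  if hi ≤ i then PySem.Int.floordiv ((i - lo + (i - hi)) * cnt) 2
  else if lo ≥ i then PySem.Int.floordiv ((lo - i + (hi - i)) * cnt) 2
  else PySem.Int.floordiv ((i - lo) * ((i - lo) + 1)) 2
       + PySem.Int.floordiv ((hi - i) * ((hi - i) + 1)) 2

def calc_badness_alt (N : Int) (h_ : List (Int × Int)) : Int :=
  let freq := (PySem.Dict.values (PySem.Dict.mk h_)).foldl
      (fun f v => pvWrapInc f v) (Array.replicate (N + 1).toNat 0)
  let st := (PySem.List.pyRange 1 (N + 1) 1).foldl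
      (fun (st : Int × Int) i =>
        let cnt := pvAGet freq i
        (st.1 + cnt, st.2 + pvSlotAdd i st.1 cnt)) (0, 0)
  st.2

-- ===== PRECONDITION & SPEC =====
-- Nodup keys is the dict well-formedness invariant (a Python dict cannot carry duplicate
-- keys, so this excludes nothing a real call could pass); the value bounds exclude exactly
-- the inputs on which 'freq[v] += 1' raises IndexError.
def Pre_calc_badness (N : Int) (h_ : List (Int × Int)) : Prop :=
  (h_.map (·.1)).Nodup ∧ ∀ p ∈ h_, -(N + 1) ≤ p.2 ∧ p.2 ≤ N
instance (N : Int) (h_ : List (Int × Int)) : Decidable (Pre_calc_badness N h_) := by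
  unfold Pre_calc_badness; infer_instance

def pvWitness_calc_badness : Int × (List (Int × Int)) := (3, [(1, 1), (2, 3), (5, 2)])

def Spec_calc_badness (N : Int) (h_ : List (Int × Int)) (out : Int) : Prop := out = calc_badness_alt N h_
instance (N : Int) (h_ : List (Int × Int)) (out : Int) : Decidable (Spec_calc_badness N h_ out) := by unfold Spec_calc_badness; infer_instance

-- ===== CLAIM (what is proved, stated in full; the proofs are below) =====
def Claim_equal_calc_badness : Prop := ∀ (N : Int) (h_ : List (Int × Int)), Dom_calc_badness N h_ → Pre_calc_badness N h_ → Spec_calc_badness N h_ (calc_badness N h_)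

-- ===== LEMMAS AND PROOFS =====

-- badness contributed by placing xs at consecutive positions p, p+1, …
def pvBadSum (p : Int) (xs : List Int) : Int :=
  match xs with
  | [] => 0
  | x :: r => |x - p| + pvBadSum (p + 1) r

theorem pvBadSum_append (xs ys : List Int) (p : Int) :
    pvBadSum p (xs ++ ys) = pvBadSum p xs + pvBadSum (p + xs.length) ys := by
  induction xs generalizing p with
  | nil => simp [pvBadSum]
  | cons x r ih => simp [pvBadSum, ih (p + 1)]; ring_nf

theorem pvWhileA_eq (i : Int) (c : Nat) (pos b : Int) :
    pvWhileA i c pos b = (pos + c, b + pvBadSum (pos + 1) (List.replicate c i)) := by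
  induction c generalizing pos b with
  | zero => simp [pvWhileA, pvBadSum]
  | succ c ih =>
      simp [pvWhileA, ih, List.replicate_succ, pvBadSum]
      constructor
      · omega
      · ring_nf

-- closed form when every position lo..lo+c-1 is ≤ i
theorem pvL1 (c : Nat) (lo i : Int) (h : lo + (c : Int) - 1 ≤ i) :
    2 * pvBadSum lo (List.replicate c i) = (2 * i - 2 * lo - ((c : Int) - 1)) * (c : Int) := by
  induction c generalizing lo with
  | zero => simp [pvBadSum]
  | succ c ih =>
      have hlo : lo ≤ i := by push_cast at h; omega
      have ihh := ih (lo + 1) (by push_cast at h ⊢; omega)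
      simp only [List.replicate_succ, pvBadSum]
      rw [abs_of_nonneg (by omega : (0 : Int) ≤ i - lo)]
      push_cast
      push_cast at ihh
      linear_combination ihh

-- closed form when every position lo..lo+c-1 is ≥ i
theorem pvL2 (c : Nat) (lo i : Int) (h : i ≤ lo) :
    2 * pvBadSum lo (List.replicate c i) = (2 * lo - 2 * i + ((c : Int) - 1)) * (c : Int) := by
  induction c generalizing lo with
  | zero => simp [pvBadSum]
  | succ c ih =>
      have ihh := ih (lo + 1) (by omega)
      simp only [List.replicate_succ, pvBadSum]
      rw [abs_of_nonpos (by omega : i - lo ≤ 0)]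
      push_cast
      push_cast at ihh
      linear_combination ihh

theorem pvFloor2 (g : Int) : PySem.Int.floordiv (2 * g) 2 = g := by
  rw [PySem.Int.floordiv_eq_ediv_of_pos (by norm_num)]
  omega

-- B's closed-form block equals A's item-by-item accumulation for one slot
theorem pvSlot (i pos : Int) (c : Nat) :
    pvSlotAdd i pos (c : Int) = pvBadSum (pos + 1) (List.replicate c i) := by
  unfold pvSlotAdd
  by_cases h1 : pos + (c : Int) ≤ i
  · rw [if_pos h1]
    have h2 := pvL1 c (pos + 1) i (by omega)
    have h3 : (i - (pos + 1) + (i - (pos + (c : Int)))) * (c : Int) =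
        2 * pvBadSum (pos + 1) (List.replicate c i) := by linear_combination -h2
    rw [h3, pvFloor2]
  · rw [if_neg h1]
    by_cases h2 : pos + 1 ≥ i
    · rw [if_pos h2]
      have h3 := pvL2 c (pos + 1) i h2
      have h4 : (pos + 1 - i + (pos + (c : Int) - i)) * (c : Int) =
          2 * pvBadSum (pos + 1) (List.replicate c i) := by linear_combination -h3
      rw [h4, pvFloor2]
    · rw [if_neg h2]
      push_neg at h1 h2
      set a : Nat := (i - (pos + 1)).toNat with ha
      set b : Nat := (pos + (c : Int) - i).toNat with hb
      have hca : (a : Int) = i - pos - 1 := by omega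
      have hcb : (b : Int) = pos + (c : Int) - i := by omega
      have hc : c = (a + 1) + b := by omega
      rw [hc, List.replicate_add, pvBadSum_append, List.length_replicate]
      have hstart : pos + 1 + ((a + 1 : Nat) : Int) = i + 1 := by push_cast; omega
      rw [hstart]
      have h4 := pvL1 (a + 1) (pos + 1) i (by push_cast; omega)
      have h5 := pvL2 b (i + 1) i (by omega)
      push_cast at h4 h5
      have hg1 : i - (pos + 1) = (a : Int) := by omega
      have hg2 : pos + ((a + 1 + b : Nat) : Int) - i = (b : Int) := by push_cast; omega
      rw [hg1, hg2]
      have e1 : (a : Int) * ((a : Int) + 1) =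
          2 * pvBadSum (pos + 1) (List.replicate (a + 1) i) := by
        linear_combination -h4 + 2 * ((a : Int) + 1) * hca
      have e2 : (b : Int) * ((b : Int) + 1) =
          2 * pvBadSum (i + 1) (List.replicate b i) := by
        linear_combination -h5
      rw [e1, e2, pvFloor2, pvFloor2]

-- freq after the counting loop: slot j holds the count of normalized values equal to j
theorem pvFreqInv (N : Int) (vs : List Int) (f : Array Int)
    (hb : ∀ v ∈ vs, -(N + 1) ≤ v ∧ v ≤ N) (hl : f.size = (N + 1).toNat) :
    (vs.foldl pvWrapInc f).size = (N + 1).toNat ∧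
    ∀ j : Int, 0 ≤ j → j < N + 1 →
      (vs.foldl pvWrapInc f).getD j.toNat 0 =
        f.getD j.toNat 0 + ((vs.map (fun v => if v < 0 then v + N + 1 else v)).count j : Int) := by
  induction vs generalizing f with
  | nil => simp [hl]
  | cons v r ih =>
      obtain ⟨hv1, hv2⟩ := hb v (List.mem_cons_self)
      have hN : 0 ≤ N := by omega
      set w : Int := if v < 0 then v + N + 1 else v with hw
      have hw0 : 0 ≤ w := by simp only [hw]; split <;> omega
      have hwN : w < N + 1 := by simp only [hw]; split <;> omega
      have hwlt : w.toNat < f.size := by omega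
      have hstep : pvWrapInc f v = f.set w.toNat (f.getD w.toNat 0 + 1) hwlt := by
        unfold pvWrapInc
        have hn : (f.size : Int) = N + 1 := by omega
        have hj : (if v < 0 then v + (f.size : Int) else v) = w := by
          rw [hn, hw]; split <;> ring
        simp only [hj]
        rw [dif_pos ⟨hw0, by omega⟩]
      have hlen : (f.set w.toNat (f.getD w.toNat 0 + 1) hwlt).size = (N + 1).toNat := by
        simp [hl]
      obtain ⟨ihL, ihD⟩ := ih (f.set w.toNat (f.getD w.toNat 0 + 1) hwlt)
        (fun x hx => hb x (List.mem_cons_of_mem _ hx)) hlen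
      refine ⟨by simpa [hstep] using ihL, ?_⟩
      intro j hj0 hjN
      rw [List.foldl_cons, hstep, ihD j hj0 hjN]
      by_cases hje : j = w
      · subst hje
        have hgs : (f.set w.toNat (f.getD w.toNat 0 + 1) hwlt).getD w.toNat 0 =
            f.getD w.toNat 0 + 1 := by
          simp [Array.getD_eq_getD_getElem?, Array.getElem?_set_self hwlt]
        rw [hgs]
        simp [hw]
        ring
      · have hne : w.toNat ≠ j.toNat := by omega
        have hgs : (f.set w.toNat (f.getD w.toNat 0 + 1) hwlt).getD j.toNat 0 =
            f.getD j.toNat 0 := by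
          simp [Array.getD_eq_getD_getElem?, Array.getElem?_set_ne hwlt hne]
        rw [hgs]
        have hneq : ¬ ((if v < 0 then v + N + 1 else v) = j) := by
          rw [← hw]; exact fun h => hje (h ▸ rfl)
        simp [hneq]

-- ===== VERDICT (by name: the statement is the Claim_ definition above) =====
theorem calc_badness_spec : Claim_equal_calc_badness := by
  unfold Claim_equal_calc_badness
  intro N h_ _ hpre
  unfold Spec_calc_badness
  obtain ⟨hnd, hbnd⟩ := hpre
  set vs : List Int := h_.map (·.2) with hvs
  have hndk : (PySem.Dict.mk h_).keys.Nodup := by rw [PySem.Dict.keys_mk]; exact hnd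
  -- A's first loop is the fold of pvWrapInc over the values list (B's first loop literally)
  have hkeys :
      (PySem.Dict.keys (PySem.Dict.mk h_)).foldl
        (fun f x => pvWrapInc f (PySem.Dict.getD (PySem.Dict.mk h_) x 0))
        (Array.replicate (N + 1).toNat 0) =
      vs.foldl pvWrapInc (Array.replicate (N + 1).toNat 0) := by
    rw [PySem.Dict.keys_mk]
    rw [List.foldl_map]
    rw [PySem.List.foldl_congr_mem h_
      (fun f p => pvWrapInc f (PySem.Dict.getD (PySem.Dict.mk h_) p.1 0))
      (fun f p => pvWrapInc f p.2) _
      (fun acc p hp => by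
        have hg := PySem.Dict.getD_of_mem_items (PySem.Dict.mk h_) (k := p.1) (v := p.2)
          (by simpa using hp) hndk 0
        simp [hg])]
    rw [hvs, List.foldl_map]
  have hbnd' : ∀ v ∈ vs, -(N + 1) ≤ v ∧ v ≤ N := by
    intro v hv
    obtain ⟨p, hp, rfl⟩ := List.mem_map.mp hv
    exact hbnd p hp
  obtain ⟨hflen, hfval⟩ := pvFreqInv N vs (Array.replicate (N + 1).toNat 0) hbnd' (by simp)
  set nvs : List Int := vs.map (fun v => if v < 0 then v + N + 1 else v) with hnvs
  set F : Array Int := vs.foldl pvWrapInc (Array.replicate (N + 1).toNat 0) with hF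
  -- each slot's freq value is the (nonnegative) count
  have hcnt : ∀ i ∈ PySem.List.pyRange 1 (N + 1) 1, pvAGet F i = (nvs.count i : Int) := by
    intro i hi
    obtain ⟨hi1, hi2⟩ := PySem.List.mem_pyRange_one.mp hi
    have hag : pvAGet F i = F.getD i.toNat 0 := by
      unfold pvAGet
      simp [show ¬ i < 0 by omega]
    rw [hag, hfval i (by omega) hi2]
    have hz : (Array.replicate (N + 1).toNat (0 : Int)).getD i.toNat 0 = 0 := by
      simp [Array.getD_eq_getD_getElem?, show i.toNat < (N + 1).toNat by omega]
    rw [hz]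
    ring
  -- both second loops fold the same state; per slot the while loop equals the closed form
  unfold calc_badness calc_badness_alt
  simp only [PySem.Dict.values_mk, ← hvs, hkeys]
  rw [PySem.List.foldl_congr_mem (PySem.List.pyRange 1 (N + 1) 1)
    (fun (st : Int × Int) i => pvWhileA i (pvAGet F i).toNat st.1 st.2)
    (fun (st : Int × Int) i =>
      (st.1 + pvAGet F i, st.2 + pvSlotAdd i st.1 (pvAGet F i))) (0, 0)
    (fun st i hi => by
      show pvWhileA i (pvAGet F i).toNat st.1 st.2 =
        (st.1 + pvAGet F i, st.2 + pvSlotAdd i st.1 (pvAGet F i))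
      rw [hcnt i hi, pvWhileA_eq, Int.toNat_natCast, pvSlot])]
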